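-- pv_equiv track=rewrite | github.com/argallmr/imef | scripts/random_undersampling.py | reverse_bins
-- ===== SOURCE A (Python) =====
-- def reverse_bins(bins, length_of_data):
--     reversed_bins = []
--     counter = 0
--
--     while counter < len(bins):
--         if counter == 0:
--             # put first bin in list (if needed)
--             if bins[0][0] == 0:
--                 pass
--             else:
--                 reversed_bins.append([0, bins[0][0]])
--         else:
--             # Put reversed bins in list
--             reversed_bins.append([bins[counter - 1][1], bins[counter][0]])
--         counter += 1
--
--     # put last bin in list (if needed)
--     if bins[-1][1] != length_of_data:
--         reversed_bins.append([bins[-1][1], length_of_data])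
--
--     return reversed_bins
-- ===== SOURCE B (Python) =====
-- def reverse_bins(bins, length_of_data):
--     # Boundary-point algorithm: flatten [0, b0_lo, b0_hi, ..., bn_hi, length_of_data],
--     # pair up consecutive boundaries into candidate gaps, then trim degenerate end gaps.
--     pts = [0]
--     for b in bins:
--         pts.append(b[0])
--         pts.append(b[1])
--     pts.append(length_of_data)
--
--     gaps = []
--     rest = pts
--     while rest:
--         gaps.append([rest[0], rest[1]])
--         rest = rest[2:]
--
--     if gaps and gaps[-1][0] == gaps[-1][1]:
--         gaps.pop()
--     if gaps and gaps[0][0] == gaps[0][1]: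
--         gaps = gaps[1:]
--     return gaps
-- ===== Notes on version B (the rewrite author's own statement) =====
-- stated objective: alternative
-- what changed: Replaces the counter-driven while loop with first/last special cases by a boundary-point algorithm: flatten all interval endpoints into one list 0,b0_lo,b0_hi,...,bn_hi,L, pair up consecutive boundaries into candidate gaps, then trim the leading/trailing gap when it is degenerate (equal endpoints).
import Mathlib
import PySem

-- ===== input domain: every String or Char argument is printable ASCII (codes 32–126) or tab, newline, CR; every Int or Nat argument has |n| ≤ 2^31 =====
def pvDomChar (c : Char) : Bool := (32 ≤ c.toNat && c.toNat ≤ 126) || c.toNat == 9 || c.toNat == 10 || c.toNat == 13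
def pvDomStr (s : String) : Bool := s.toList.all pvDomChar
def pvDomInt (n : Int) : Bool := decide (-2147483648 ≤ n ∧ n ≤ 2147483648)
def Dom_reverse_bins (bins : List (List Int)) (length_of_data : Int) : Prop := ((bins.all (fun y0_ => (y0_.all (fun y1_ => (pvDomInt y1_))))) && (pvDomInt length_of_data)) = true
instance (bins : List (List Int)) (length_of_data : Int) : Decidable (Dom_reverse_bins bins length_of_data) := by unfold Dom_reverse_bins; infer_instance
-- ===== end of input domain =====

-- B replaces A's counter loop (with first/last special cases) by a boundary-point algorithm:
-- flatten all endpoints into 0,b0_lo,b0_hi,…,bn_hi,L, pair up consecutive boundaries into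
-- candidate gaps, then trim degenerate end gaps (alternative decomposition; same cost).

-- shared indexing helpers: xs[i] with Python semantics; the default is only reached outside Pre_
def pvGetL (xs : List (List Int)) (i : Int) : List Int := (PySem.List.pyGet? xs i).getD []
def pvGetI (xs : List Int) (i : Int) : Int := (PySem.List.pyGet? xs i).getD 0

-- ===== PORT A =====
def reverse_bins (bins : List (List Int)) (length_of_data : Int) : List (List Int) :=
  -- while counter < len(bins): … counter += 1   ⇒ fold over counter = 0,1,…,len(bins)-1
  let reversed_bins :=
    (PySem.List.pyRange 0 (bins.length : Int) 1).foldl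
      (fun acc counter =>
        if counter = 0 then
          if pvGetI (pvGetL bins 0) 0 = 0 then acc
          else acc ++ [[0, pvGetI (pvGetL bins 0) 0]]
        else
          acc ++ [[pvGetI (pvGetL bins (counter - 1)) 1, pvGetI (pvGetL bins counter) 0]])
      []
  if pvGetI (pvGetL bins (-1)) 1 ≠ length_of_data then
    reversed_bins ++ [[pvGetI (pvGetL bins (-1)) 1, length_of_data]]
  else reversed_bins

-- ===== PORT B =====
-- 'while i < len(pts): gaps.append([pts[i], pts[i+1]]); i += 2'
def pvPairLoop (pts : List Int) (i : Nat) (gaps : List (List Int)) : List (List Int) :=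
  if i < pts.length then
    pvPairLoop pts (i + 2) (gaps ++ [[pvGetI pts (i : Int), pvGetI pts ((i : Int) + 1)]])
  else gaps
termination_by pts.length - i

def reverse_bins_alt (bins : List (List Int)) (length_of_data : Int) : List (List Int) :=
  let pts := bins.foldl (fun acc b => acc ++ [pvGetI b 0, pvGetI b 1]) [0] ++ [length_of_data]
  let gaps := pvPairLoop pts 0 []
  let gaps := if gaps ≠ [] ∧ pvGetI (pvGetL gaps (-1)) 0 = pvGetI (pvGetL gaps (-1)) 1
              then gaps.dropLast else gaps
  if gaps ≠ [] ∧ pvGetI (pvGetL gaps 0) 0 = pvGetI (pvGetL gaps 0) 1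
  then gaps.drop 1 else gaps

-- ===== PRECONDITION & SPEC =====
-- Pre_: exactly the inputs where Python A returns (empty bins or an inner bin shorter
-- than 2 makes A raise IndexError at bins[i][0]/bins[i][1]/bins[-1][1]).
def Pre_reverse_bins (bins : List (List Int)) (length_of_data : Int) : Prop :=
  bins ≠ [] ∧ ∀ b ∈ bins, 2 ≤ b.length
instance (bins : List (List Int)) (length_of_data : Int) : Decidable (Pre_reverse_bins bins length_of_data) := by unfold Pre_reverse_bins; infer_instance
def pvWitness_reverse_bins : List (List Int) × Int := ([[2, 4], [6, 7]], 10)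

def Spec_reverse_bins (bins : List (List Int)) (length_of_data : Int) (out : List (List Int)) : Prop := out = reverse_bins_alt bins length_of_data
instance (bins : List (List Int)) (length_of_data : Int) (out : List (List Int)) : Decidable (Spec_reverse_bins bins length_of_data out) := by unfold Spec_reverse_bins; infer_instance

-- ===== CLAIM (what is proved, stated in full; the proofs are below) =====
def Claim_equal_reverse_bins : Prop := ∀ (bins : List (List Int)) (length_of_data : Int), Dom_reverse_bins bins length_of_data → Pre_reverse_bins bins length_of_data → Spec_reverse_bins bins length_of_data (reverse_bins bins length_of_data)

-- ===== LEMMAS AND PROOFS =====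

-- A-SIDE: the middle gaps A's indexed loop produces, in zip form
theorem mids_eq (bins : List (List Int)) (h : bins ≠ []) :
    (PySem.List.pyRange 1 (bins.length : Int) 1).map
      (fun c => [pvGetI (pvGetL bins (c - 1)) 1, pvGetI (pvGetL bins c) 0])
    = (bins.zip (bins.drop 1)).map (fun pc => [pvGetI pc.1 1, pvGetI pc.2 0]) := by
  have hn : 1 ≤ bins.length := List.length_pos_of_ne_nil h
  rw [PySem.List.pyRange_one]
  rw [List.map_map]
  apply List.ext_getElem
  · simp [List.length_zip]
  · intro i h1 h2
    have hi : i < bins.length - 1 := by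
      simp [List.length_zip] at h2; omega
    simp only [List.getElem_map, List.getElem_range, Function.comp_apply,
      List.getElem_zip, List.getElem_drop]
    have e1 : (1 : Int) + (i : Int) - 1 = (i : Int) := by omega
    have e2 : (1 : Int) + (i : Int) = ((i + 1 : Nat) : Int) := by push_cast; omega
    rw [e1, e2]
    simp [pvGetL, PySem.List.pyGet?_natCast]
    have hi1 : i < bins.length := by omega
    have hi2 : i + 1 < bins.length := by omega
    have e3 : ((i : Int) + 1) = ((i + 1 : Nat) : Int) := by push_cast; ring
    rw [e3, PySem.List.pyGet?_natCast]
    constructor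
    · simp [hi1]
    · have e4 : (1 : Nat) + i = i + 1 := by omega
      simp [hi2, e4]

theorem loop_eq (bins : List (List Int)) (h : bins ≠ []) :
    (PySem.List.pyRange 0 (bins.length : Int) 1).foldl
      (fun acc counter =>
        if counter = 0 then
          if pvGetI (pvGetL bins 0) 0 = 0 then acc
          else acc ++ [[0, pvGetI (pvGetL bins 0) 0]]
        else
          acc ++ [[pvGetI (pvGetL bins (counter - 1)) 1, pvGetI (pvGetL bins counter) 0]])
      []
    = (if pvGetI (pvGetL bins 0) 0 ≠ 0 then [[0, pvGetI (pvGetL bins 0) 0]] else [])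
      ++ (bins.zip (bins.drop 1)).map (fun pc => [pvGetI pc.1 1, pvGetI pc.2 0]) := by
  have hn : 1 ≤ bins.length := List.length_pos_of_ne_nil h
  have h0 : (0 : Int) < (bins.length : Int) := by exact_mod_cast hn
  rw [PySem.List.pyRange_one_cons h0, List.foldl_cons]
  have hbody : ∀ acc : List (List Int),
      (PySem.List.pyRange 1 (bins.length : Int) 1).foldl
        (fun acc counter =>
          if counter = 0 then
            if pvGetI (pvGetL bins 0) 0 = 0 then acc
            else acc ++ [[0, pvGetI (pvGetL bins 0) 0]]
          else
            acc ++ [[pvGetI (pvGetL bins (counter - 1)) 1, pvGetI (pvGetL bins counter) 0]])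
        acc
      = acc ++ (bins.zip (bins.drop 1)).map (fun pc => [pvGetI pc.1 1, pvGetI pc.2 0]) := by
    intro acc
    rw [← mids_eq bins h]
    rw [PySem.List.foldl_congr_mem (g := fun acc counter =>
      acc ++ [[pvGetI (pvGetL bins (counter - 1)) 1, pvGetI (pvGetL bins counter) 0]])]
    · exact PySem.List.foldl_append_singleton_eq_map ..
    · intro acc' c hc
      have : (1 : Int) ≤ c := (PySem.List.mem_pyRange_one.mp hc).1
      have hne : c ≠ 0 := by omega
      simp [hne]
  simp only [reduceIte, zero_add, List.nil_append]
  rw [hbody]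
  by_cases hz : pvGetI (pvGetL bins 0) 0 = 0 <;> simp [hz]

-- B-SIDE: structural pairing of a flat list (what pvPairLoop computes)
def pvPairs : List Int → List (List Int)
  | [] => []
  | [a] => [[a, 0]]
  | a :: b :: t => [a, b] :: pvPairs t

theorem pairLoop_eq_pairs (pts : List Int) :
    ∀ (i : Nat) (gaps : List (List Int)),
    pvPairLoop pts i gaps = gaps ++ pvPairs (pts.drop i) := by
  intro i
  induction hfu : pts.length - i using Nat.strong_induction_on generalizing i with
  | _ fuel ih =>
    intro gaps
    rw [pvPairLoop]
    by_cases hlt : i < pts.length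
    · simp only [hlt, if_true]
      have hd : pts.drop i = pts[i] :: pts.drop (i + 1) := List.drop_eq_getElem_cons hlt
      have hg0 : pvGetI pts (i : Int) = pts[i] := by
        simp [pvGetI, PySem.List.pyGet?_natCast, hlt]
      by_cases h2 : i + 1 < pts.length
      · have hd1 : pts.drop (i + 1) = pts[i + 1] :: pts.drop (i + 2) :=
          List.drop_eq_getElem_cons h2
        have hg1 : pvGetI pts ((i : Int) + 1) = pts[i + 1] := by
          have hc : ((i : Int) + 1) = ((i + 1 : Nat) : Int) := by push_cast; ring
          simp only [pvGetI, hc, PySem.List.pyGet?_natCast, List.getElem?_eq_getElem h2,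
            Option.getD_some]
        rw [ih (pts.length - (i + 2)) (by omega) (i + 2) rfl]
        rw [hd, hd1, pvPairs, hg0, hg1]
        simp
      · -- i + 1 = pts.length: pts[i+1] is out of range (Python would raise; outside Pre_)
        have hlen : i + 1 = pts.length := by omega
        have hd1 : pts.drop (i + 1) = [] := List.drop_eq_nil_of_le (by omega)
        have hg1 : pvGetI pts ((i : Int) + 1) = 0 := by
          have hc : ((i : Int) + 1) = ((i + 1 : Nat) : Int) := by push_cast; ring
          simp only [pvGetI, hc, PySem.List.pyGet?_natCast,
            List.getElem?_eq_none (by omega : pts.length ≤ i + 1), Option.getD_none]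
        rw [ih (pts.length - (i + 2)) (by omega) (i + 2) rfl]
        rw [hd, hd1, pvPairs, hg0, hg1]
        have : pts.drop (i + 2) = [] := List.drop_eq_nil_of_le (by omega)
        simp [this, pvPairs]
    · simp only [hlt, if_false]
      have : pts.drop i = [] := List.drop_eq_nil_of_le (by omega)
      simp [this, pvPairs]

-- the flat boundary list, paired up, in head/mids/tail form
theorem pairs_shape : ∀ (t : List (List Int)) (c : List Int) (x L : Int),
    pvPairs (x :: ((c :: t).flatMap fun b => [pvGetI b 0, pvGetI b 1]) ++ [L])
    = ([x, pvGetI c 0] ::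
        (((c :: t).zip t).map (fun pc => [pvGetI pc.1 1, pvGetI pc.2 0])))
      ++ [[pvGetI ((c :: t).getLast (by simp)) 1, L]] := by
  intro t
  induction t with
  | nil => intro c x L; simp [pvPairs]
  | cons d t' ih =>
    intro c x L
    have hflat : ((c :: d :: t').flatMap fun b => [pvGetI b 0, pvGetI b 1])
        = pvGetI c 0 :: pvGetI c 1 :: ((d :: t').flatMap fun b => [pvGetI b 0, pvGetI b 1]) := by
      simp
    rw [hflat]
    show pvPairs (x :: pvGetI c 0 :: (pvGetI c 1 :: ((d :: t').flatMap fun b => [pvGetI b 0, pvGetI b 1]) ++ [L])) = _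
    rw [pvPairs, ih d (pvGetI c 1) L]
    simp [List.getLast_cons]

theorem reverse_bins_eq (bins : List (List Int)) (length_of_data : Int)
    (hpre : Pre_reverse_bins bins length_of_data) :
    reverse_bins bins length_of_data = reverse_bins_alt bins length_of_data := by
  obtain ⟨hne, -⟩ := hpre
  obtain ⟨c, t, rfl⟩ := List.exists_cons_of_ne_nil hne
  unfold reverse_bins reverse_bins_alt
  dsimp only
  rw [loop_eq (c :: t) hne]
  -- flatten the pts fold
  rw [PySem.List.foldl_append_eq_flatMap]
  have hpts : ([(0 : Int)] ++ ((c :: t).flatMap fun b => [pvGetI b 0, pvGetI b 1])) ++ [length_of_data]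
      = (0 : Int) :: ((c :: t).flatMap fun b => [pvGetI b 0, pvGetI b 1]) ++ [length_of_data] := by
    simp
  rw [hpts, pairLoop_eq_pairs, List.drop_zero, List.nil_append, pairs_shape]
  have hA0 : pvGetL (c :: t) 0 = c := by simp [pvGetL]
  have hAl : pvGetL (c :: t) (-1) = (c :: t).getLast (by simp) := by
    simp [pvGetL, PySem.List.pyGet?_neg_one, List.getLast?_eq_some_getLast]
  have hzipdrop : (c :: t).zip ((c :: t).drop 1) = (c :: t).zip t := by simp
  rw [hzipdrop, hA0, hAl]
  -- small-list index facts
  have e0 : ∀ a b : Int, pvGetI [a, b] 0 = a := by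
    intro a b; simp [pvGetI, PySem.List.pyGet?, PySem.List.pyIdx?]
  have e1 : ∀ a b : Int, pvGetI [a, b] 1 = b := by
    intro a b; simp [pvGetI, PySem.List.pyGet?, PySem.List.pyIdx?]
  have hlast : ∀ (y z : List Int) (ms : List (List Int)),
      pvGetL (y :: (ms ++ [z])) (-1) = z := by
    intro y z ms
    rw [pvGetL, PySem.List.pyGet?_neg_one,
      show (y :: (ms ++ [z])) = (y :: ms) ++ [z] from by simp, List.getLast?_concat]
    rfl
  have hdrop : ∀ (y z : List Int) (ms : List (List Int)),
      (y :: (ms ++ [z])).dropLast = y :: ms := by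
    intro y z ms
    rw [show (y :: (ms ++ [z])) = (y :: ms) ++ [z] from by simp, List.dropLast_concat]
  have hzero : ∀ (y : List Int) (ms : List (List Int)), pvGetL (y :: ms) 0 = y := by
    intro y ms; simp [pvGetL]
  by_cases htail : pvGetI ((c :: t).getLast (by simp)) 1 = length_of_data
  · by_cases hhead : pvGetI c 0 = 0
    · simp [htail, hhead, hlast, hdrop, hzero, e0, e1]
    · simp [htail, hhead, hlast, hdrop, hzero, e0, e1, Ne.symm hhead]
  · by_cases hhead : pvGetI c 0 = 0
    · simp [htail, hhead, hlast, hdrop, hzero, e0, e1, Ne.symm htail]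
    · simp [htail, hhead, hlast, hdrop, hzero, e0, e1, Ne.symm htail, Ne.symm hhead]

-- ===== VERDICT (by name: the statement is the Claim_ definition above) =====
theorem reverse_bins_spec : Claim_equal_reverse_bins := by
  intro bins length_of_data _ hpre
  exact reverse_bins_eq bins length_of_data hpre
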